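-- pv_equiv track=rewrite | github.com/alvesykes/AdventOfCode2025 | 1/part1.py | rotateL
-- ===== SOURCE A (Python) =====
-- def rotateL(x, i):
--     if i - x < 0:
--         i = 100 + (i - x)
--     else:
--         i -= x
--     while i < 0:
--         i += 100
--     return i
-- ===== SOURCE B (Python) =====
-- def rotateL(x, i):
--     d = i - x
--     return d if d >= 0 else d % 100
-- ===== Notes on version B (the rewrite author's own statement) =====
-- stated objective: simpler
-- what changed: Replaces the conditional 100-offset plus the while-loop normalization with a single Python modulo on the negative branch (d % 100 with d < 0 is already non-negative), keeping d unchanged when d >= 0 as A does.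
import Mathlib
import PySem

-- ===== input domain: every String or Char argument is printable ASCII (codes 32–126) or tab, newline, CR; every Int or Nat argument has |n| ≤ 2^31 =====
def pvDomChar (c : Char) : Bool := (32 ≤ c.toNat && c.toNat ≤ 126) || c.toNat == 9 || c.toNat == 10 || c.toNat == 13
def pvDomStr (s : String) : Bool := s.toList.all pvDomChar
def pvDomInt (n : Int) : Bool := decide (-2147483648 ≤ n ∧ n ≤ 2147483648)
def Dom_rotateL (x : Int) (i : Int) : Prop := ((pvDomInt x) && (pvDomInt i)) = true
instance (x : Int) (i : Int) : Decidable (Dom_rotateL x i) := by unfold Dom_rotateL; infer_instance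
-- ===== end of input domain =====

-- B replaces A's `while i < 0: i += 100` normalization by a single `d % 100` on the negative branch (simpler).

-- ===== PORT A =====
-- A's while-loop: add 100 until non-negative
def rotateLWhile (i : Int) : Int :=
  if h : i < 0 then rotateLWhile (i + 100) else i
termination_by (-i).toNat
decreasing_by omega

def rotateL (x : Int) (i : Int) : Int :=
  let i' := if i - x < 0 then 100 + (i - x) else i - x
  rotateLWhile i'

-- ===== PORT B =====
def rotateL_alt (x : Int) (i : Int) : Int :=
  let d := i - x
  if d ≥ 0 then d else PySem.Int.mod d 100

-- ===== PRECONDITION & SPEC =====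
def Spec_rotateL (x : Int) (i : Int) (out : Int) : Prop := out = rotateL_alt x i
instance (x : Int) (i : Int) (out : Int) : Decidable (Spec_rotateL x i out) := by unfold Spec_rotateL; infer_instance

-- ===== CLAIM (what is proved, stated in full; the proofs are below) =====
def Claim_equal_rotateL : Prop := ∀ (x : Int) (i : Int), Dom_rotateL x i → Spec_rotateL x i (rotateL x i)

-- ===== LEMMAS AND PROOFS =====
theorem rotateLWhile_eq_mod (j : Int) (hj : j < 100) : rotateLWhile j = j % 100 := by
  by_cases h : j < 0
  · rw [rotateLWhile.eq_def]
    simp only [h, dite_true]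
    have := rotateLWhile_eq_mod (j + 100) (by omega)
    rw [this]
    omega
  · rw [rotateLWhile.eq_def]
    simp only [h, dite_false]
    omega
termination_by (-j).toNat
decreasing_by omega

-- ===== VERDICT (by name: the statement is the Claim_ definition above) =====
theorem rotateL_spec : Claim_equal_rotateL := by
  intro x i _
  unfold Spec_rotateL rotateL rotateL_alt
  simp only []
  set d := i - x with hd
  by_cases h : d < 0
  · have h100 : 100 + d < 100 := by omega
    simp only [h, if_true, show ¬ d ≥ 0 by omega, if_false]
    rw [rotateLWhile_eq_mod _ h100, PySem.Int.mod_eq_emod_of_pos (by norm_num : (0:Int) < 100)]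
    omega
  · simp only [h, if_false, show d ≥ 0 by omega, if_true]
    rw [rotateLWhile.eq_def]
    simp [show ¬ d < 0 by omega]
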